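-- pv_equiv track=rewrite | github.com/DingChiLin/AlgorithmSampleCode | DynamicProgramming/String/EditDistancePath.py | diffBetweenTwoStrings
-- ===== SOURCE A (Python) =====
-- def diffBetweenTwoStrings(source, target):
--     N = len(source)
--     M = len(target)
--     dp = [[0 for _ in range(M+1)] for _ in range(N+1)]
--     path = [[(None, None) for _ in range(M+1)] for _ in range(N+1)]
--
--     for i in range(1, N+1):
--         dp[i][0] = i
--         path[i][0] = (i-1, 0)
--     for j in range(1, M+1):
--         dp[0][j] = j
--         path[0][j] = (0, j-1)
--     for i in range(1, N+1):
--         for j in range(1, M+1):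
--             if source[i-1] == target[j-1]:
--                 dp[i][j] = dp[i-1][j-1]
--                 path[i][j] = (i-1, j-1)
--             else:
--                 if dp[i-1][j] >= dp[i][j-1]:
--                     path[i][j] = (i, j-1)
--                     dp[i][j] = 1 + dp[i][j-1]
--                 else: # if it's equal
--                     path[i][j] = (i-1, j)
--                     dp[i][j] = 1 + dp[i-1][j]
--
--     final_path = []
--     i = N
--     j = M
--     while i != None and j != None:
--         final_path.append((i, j))
--         i, j = path[i][j]
--
--     ans = []
--     #compare: final_path[i] and final_path[i-1]
--     for i in range(1, len(final_path)):
--         last = final_path[i-1] # N-1, M-1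
--         cur = final_path[i] # N-1, M-2
--         if cur[0] == last[0] - 1 and cur[1] == last[1] - 1:
--             ans.append(source[last[0]-1])
--         elif cur[0] == last[0] - 1:
--             ans.append('-' + source[last[0]-1])
--         else: # cur[1] == last[1] - 1
--             ans.append('+' + target[last[1]-1])
--
--     ans = ans[::-1]
--     return ans
-- ===== SOURCE B (Python) =====
-- def diffBetweenTwoStrings(source, target):
--     N, M = len(source), len(target)
--     # LCS-length table (not the edit-distance table)
--     L = [[0] * (M + 1) for _ in range(N + 1)]
--     for i in range(1, N + 1):
--         for j in range(1, M + 1):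
--             if source[i-1] == target[j-1]:
--                 L[i][j] = L[i-1][j-1] + 1
--             else:
--                 L[i][j] = max(L[i-1][j], L[i][j-1])
--     # extract only the matched index pairs of the canonical LCS
--     pairs = []
--     i, j = N, M
--     while i > 0 or j > 0:
--         if i > 0 and j > 0 and source[i-1] == target[j-1]:
--             pairs.append((i-1, j-1))
--             i, j = i - 1, j - 1
--         elif j > 0 and (i == 0 or L[i][j-1] >= L[i-1][j]):
--             j -= 1
--         else:
--             i -= 1
--     pairs.reverse()
--     # linear merge around the match points: each gap is deletions then insertions
--     ans = []
--     si = tj = 0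
--     for (mi, mj) in pairs:
--         ans += ['-' + c for c in source[si:mi]]
--         ans += ['+' + c for c in target[tj:mj]]
--         ans.append(source[mi])
--         si, tj = mi + 1, mj + 1
--     ans += ['-' + c for c in source[si:]]
--     ans += ['+' + c for c in target[tj:]]
--     return ans
-- ===== Notes on version B (the rewrite author's own statement) =====
-- stated objective: alternative
-- what changed: B replaces A's edit-distance table plus parent-pointer matrix and step-by-step path decoding by an LCS-length table (max recurrence) from which only the matched index pairs are extracted, and then produces the diff by a linear merge of source/target slices around those match points, relying on the provable fact that each gap of A's diff is all deletions followed by all insertions.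
import Mathlib
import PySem

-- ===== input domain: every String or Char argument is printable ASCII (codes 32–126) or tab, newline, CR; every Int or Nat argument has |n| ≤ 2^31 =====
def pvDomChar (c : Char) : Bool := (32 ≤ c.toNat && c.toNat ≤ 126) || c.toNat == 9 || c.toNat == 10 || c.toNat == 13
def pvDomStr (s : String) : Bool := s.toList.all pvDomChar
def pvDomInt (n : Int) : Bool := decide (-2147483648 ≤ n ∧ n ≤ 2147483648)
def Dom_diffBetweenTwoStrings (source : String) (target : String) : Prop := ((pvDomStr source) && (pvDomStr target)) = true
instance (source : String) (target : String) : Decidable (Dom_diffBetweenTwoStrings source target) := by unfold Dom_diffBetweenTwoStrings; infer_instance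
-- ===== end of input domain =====

-- B replaces A's edit-distance + parent-pointer tables and path decoding by an LCS table from
-- which only the matched index pairs are extracted, followed by a linear slice merge; objective:
-- alternative algorithm (no speed claim).

-- ===== PORT A =====
-- Python's list-of-lists tables are modelled as functions Nat → Nat → value with pointwise
-- update (exact: every index A reads or writes is a fixed in-range nonnegative index).
def pvUpd2 {α : Type} (f : Nat → Nat → α) (i j : Nat) (v : α) : Nat → Nat → α :=
  fun i' j' => if i' = i ∧ j' = j then v else f i' j'

-- A's three fill loops, each Python for-loop one foldl over its range
def pvFill1 (N : Nat) : ((Nat → Nat → Int) × (Nat → Nat → Option Nat × Option Nat)) :=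
  (List.range' 1 N).foldl
    (fun st i => (pvUpd2 st.1 i 0 (i : Int), pvUpd2 st.2 i 0 (some (i-1), some 0)))
    (fun _ _ => 0, fun _ _ => (none, none))

def pvFill2 (N M : Nat) : ((Nat → Nat → Int) × (Nat → Nat → Option Nat × Option Nat)) :=
  (List.range' 1 M).foldl
    (fun st j => (pvUpd2 st.1 0 j (j : Int), pvUpd2 st.2 0 j (some 0, some (j-1))))
    (pvFill1 N)

-- inner loop of A's main double loop at row i; m = number of processed columns
def pvRowA (s t : List Char) (st : ((Nat → Nat → Int) × (Nat → Nat → Option Nat × Option Nat)))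
    (i m : Nat) : ((Nat → Nat → Int) × (Nat → Nat → Option Nat × Option Nat)) :=
  (List.range' 1 m).foldl (fun st j =>
    if s.getD (i-1) ' ' = t.getD (j-1) ' ' then
      (pvUpd2 st.1 i j (st.1 (i-1) (j-1)), pvUpd2 st.2 i j (some (i-1), some (j-1)))
    else if st.1 (i-1) j ≥ st.1 i (j-1) then
      (pvUpd2 st.1 i j (1 + st.1 i (j-1)), pvUpd2 st.2 i j (some i, some (j-1)))
    else
      (pvUpd2 st.1 i j (1 + st.1 (i-1) j), pvUpd2 st.2 i j (some (i-1), some j))) st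

def pvFill3 (s t : List Char) (N M k : Nat) :
    ((Nat → Nat → Int) × (Nat → Nat → Option Nat × Option Nat)) :=
  (List.range' 1 k).foldl (fun st i => pvRowA s t st i M) (pvFill2 N M)

-- A's while loop; fuel N+M+1 provably suffices (each step decreases i+j)
def pvWalkA (path : Nat → Nat → Option Nat × Option Nat) :
    Nat → Option Nat → Option Nat → List (Nat × Nat) → List (Nat × Nat)
  | 0, _, _, acc => acc
  | fuel+1, some i, some j, acc =>
      pvWalkA path fuel (path i j).1 (path i j).2 (acc ++ [(i, j)])
  | _+1, none, _, acc => acc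
  | _+1, some _, none, acc => acc

-- body of A's final for loop (index comparisons over Int, as Python compares ints)
def pvEmit (s t : List Char) (last cur : Nat × Nat) : String :=
  if (cur.1 : Int) = (last.1 : Int) - 1 ∧ (cur.2 : Int) = (last.2 : Int) - 1 then
    String.ofList [s.getD (last.1 - 1) ' ']
  else if (cur.1 : Int) = (last.1 : Int) - 1 then
    String.ofList ['-', s.getD (last.1 - 1) ' ']
  else
    String.ofList ['+', t.getD (last.2 - 1) ' ']

def diffBetweenTwoStrings (source : String) (target : String) : List String :=
  let s := source.toList
  let t := target.toList
  let N := s.length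
  let M := t.length
  let st3 := pvFill3 s t N M N
  let fp := pvWalkA st3.2 (N + M + 1) (some N) (some M) []
  let ans := (List.range' 1 (fp.length - 1)).foldl
    (fun ans i => ans ++ [pvEmit s t (fp.getD (i-1) (0,0)) (fp.getD i (0,0))]) []
  ans.reverse

-- ===== PORT B =====
-- source[a:b] rendered as '-'-lines (exact: B only slices with in-range bounds)
def pvDelsF (s : List Char) (a b : Nat) : List String :=
  ((s.drop a).take (b - a)).map (fun c => String.ofList ['-', c])

-- target[a:b] rendered as '+'-lines
def pvInsF (t : List Char) (a b : Nat) : List String :=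
  ((t.drop a).take (b - a)).map (fun c => String.ofList ['+', c])

-- row i of B's LCS table, built left to right (row 0 entry is L[i][0] = 0)
def pvLRowB (s t : List Char) (L : List (List Nat)) (i m : Nat) : List Nat :=
  (List.range' 1 m).foldl (fun row j =>
    if s.getD (i-1) ' ' = t.getD (j-1) ' ' then
      row ++ [(L.getD (i-1) []).getD (j-1) 0 + 1]
    else
      row ++ [max ((L.getD (i-1) []).getD j 0) (row.getD (j-1) 0)]) [0]

def pvLTabB (s t : List Char) (M k : Nat) : List (List Nat) :=
  (List.range' 1 k).foldl (fun L i => L ++ [pvLRowB s t L i M]) [List.replicate (M+1) 0]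

-- B's while loop collecting only the matched index pairs; terminates since i+j decreases
def pvPairsB (s t : List Char) (L : List (List Nat)) (i j : Nat) (acc : List (Nat × Nat)) :
    List (Nat × Nat) :=
  if h0 : i = 0 ∧ j = 0 then acc
  else if h1 : 0 < i ∧ 0 < j ∧ s.getD (i-1) ' ' = t.getD (j-1) ' ' then
    pvPairsB s t L (i-1) (j-1) (acc ++ [(i-1, j-1)])
  else if h2 : 0 < j ∧ (i = 0 ∨ (L.getD i []).getD (j-1) 0 ≥ (L.getD (i-1) []).getD j 0) then
    pvPairsB s t L i (j-1) acc
  else pvPairsB s t L (i-1) j acc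
termination_by i + j
decreasing_by
  · obtain ⟨a, b, -⟩ := h1; omega
  · obtain ⟨a, -⟩ := h2; omega
  · rcases Nat.eq_zero_or_pos i with hi | hi
    · exact absurd ⟨Nat.pos_of_ne_zero (fun hj => h0 ⟨hi, hj⟩), Or.inl hi⟩ h2
    · omega

def diffBetweenTwoStrings_alt (source : String) (target : String) : List String :=
  let s := source.toList
  let t := target.toList
  let N := s.length
  let M := t.length
  let L := pvLTabB s t M N
  let pairs := (pvPairsB s t L N M []).reverse
  let st := pairs.foldl (fun st p =>
    (st.1 ++ pvDelsF s st.2.1 p.1 ++ pvInsF t st.2.2 p.2 ++ [String.ofList [s.getD p.1 ' ']],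
     p.1 + 1, p.2 + 1)) (([] : List String), 0, 0)
  st.1 ++ pvDelsF s st.2.1 N ++ pvInsF t st.2.2 M

-- ===== PRECONDITION & SPEC =====
def Spec_diffBetweenTwoStrings (source : String) (target : String) (out : List String) : Prop := out = diffBetweenTwoStrings_alt source target
instance (source : String) (target : String) (out : List String) : Decidable (Spec_diffBetweenTwoStrings source target out) := by unfold Spec_diffBetweenTwoStrings; infer_instance

-- ===== CLAIM (what is proved, stated in full; the proofs are below) =====
def Claim_equal_diffBetweenTwoStrings : Prop := ∀ (source : String) (target : String), Dom_diffBetweenTwoStrings source target → Spec_diffBetweenTwoStrings source target (diffBetweenTwoStrings source target)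

-- ===== LEMMAS AND PROOFS =====

-- the dp recurrence A computes (A's tie rule written out)
def pvD (s t : List Char) : Nat → Nat → Int
  | 0, j => (j : Int)
  | i+1, 0 => ((i+1 : Nat) : Int)
  | i+1, j+1 =>
    if s.getD i ' ' = t.getD j ' ' then pvD s t i j
    else if pvD s t i (j+1) ≥ pvD s t (i+1) j then 1 + pvD s t (i+1) j
    else 1 + pvD s t i (j+1)
termination_by i j => (i, j)
decreasing_by all_goals (first | exact Prod.Lex.left _ _ (by omega) | exact Prod.Lex.right _ (by omega))

-- the pointer A stores at each cell
def pvP (s t : List Char) : Nat → Nat → Option Nat × Option Nat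
  | 0, 0 => (none, none)
  | i+1, 0 => (some i, some 0)
  | 0, j+1 => (some 0, some j)
  | i+1, j+1 =>
    if s.getD i ' ' = t.getD j ' ' then (some i, some j)
    else if pvD s t i (j+1) ≥ pvD s t (i+1) j then (some (i+1), some j)
    else (some i, some (j+1))

-- the abstract backtracking trace and its emitted symbols, in emission order
def pvTrace (s t : List Char) (i j : Nat) : List (Nat × Nat) :=
  if h0 : i = 0 ∧ j = 0 then [(0, 0)]
  else if h1 : 0 < i ∧ 0 < j ∧ s.getD (i-1) ' ' = t.getD (j-1) ' ' then
    (i, j) :: pvTrace s t (i-1) (j-1)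
  else if h2 : 0 < j ∧ (i = 0 ∨ pvD s t (i-1) j ≥ pvD s t i (j-1)) then
    (i, j) :: pvTrace s t i (j-1)
  else (i, j) :: pvTrace s t (i-1) j
termination_by i + j
decreasing_by
  · obtain ⟨a, b, -⟩ := h1; omega
  · obtain ⟨a, -⟩ := h2; omega
  · rcases Nat.eq_zero_or_pos i with hi | hi
    · exact absurd ⟨Nat.pos_of_ne_zero (fun hj => h0 ⟨hi, hj⟩), Or.inl hi⟩ h2
    · omega

def pvSyms (s t : List Char) (i j : Nat) : List String :=
  if h0 : i = 0 ∧ j = 0 then []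
  else if h1 : 0 < i ∧ 0 < j ∧ s.getD (i-1) ' ' = t.getD (j-1) ' ' then
    String.ofList [s.getD (i-1) ' '] :: pvSyms s t (i-1) (j-1)
  else if h2 : 0 < j ∧ (i = 0 ∨ pvD s t (i-1) j ≥ pvD s t i (j-1)) then
    String.ofList ['+', t.getD (j-1) ' '] :: pvSyms s t i (j-1)
  else String.ofList ['-', s.getD (i-1) ' '] :: pvSyms s t (i-1) j
termination_by i + j
decreasing_by
  · obtain ⟨a, b, -⟩ := h1; omega
  · obtain ⟨a, -⟩ := h2; omega
  · rcases Nat.eq_zero_or_pos i with hi | hi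
    · exact absurd ⟨Nat.pos_of_ne_zero (fun hj => h0 ⟨hi, hj⟩), Or.inl hi⟩ h2
    · omega

theorem pvRange'_succ (n : Nat) : List.range' 1 (n+1) = List.range' 1 n ++ [n+1] := by
  have := List.range'_concat (s := 1) (n := n) (step := 1)
  simpa [Nat.add_comm] using this

theorem pvUpd2_ne {α : Type} (f : Nat → Nat → α) (i j : Nat) (v : α) (i' j' : Nat)
    (h : ¬(i' = i ∧ j' = j)) : pvUpd2 f i j v i' j' = f i' j' := by
  simp only [pvUpd2, if_neg h]

theorem pvUpd2_self {α : Type} (f : Nat → Nat → α) (i j : Nat) (v : α) :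
    pvUpd2 f i j v i j = v := by
  simp [pvUpd2]

theorem pvD_row0 (s t : List Char) (j : Nat) : pvD s t 0 j = (j : Int) := by rw [pvD]

theorem pvD_col0 (s t : List Char) (i : Nat) : pvD s t i 0 = (i : Int) := by
  cases i <;> rw [pvD]

theorem pvGetDmr {α : Type} (f : Nat → α) (n i : Nat) (h : i < n) (d : α) :
    ((List.range n).map f).getD i d = f i := by
  simp [List.getD_eq_getElem?_getD, List.getElem?_map, List.getElem?_range, h]

theorem pvFill1_step (n : Nat) : pvFill1 (n+1) =
    (pvUpd2 (pvFill1 n).1 (n+1) 0 (((n+1 : Nat)) : Int),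
     pvUpd2 (pvFill1 n).2 (n+1) 0 (some (n+1-1), some 0)) := by
  unfold pvFill1
  rw [pvRange'_succ, List.foldl_append]
  rfl

theorem pvFill1_fst (N : Nat) : ∀ i j : Nat,
    (pvFill1 N).1 i j = if 1 ≤ i ∧ i ≤ N ∧ j = 0 then (i : Int) else 0 := by
  induction N with
  | zero =>
    intro i j
    unfold pvFill1
    simp only [List.range'_zero, List.foldl_nil]
    split_ifs with h
    · omega
    · rfl
  | succ n ih =>
    intro i j
    rw [pvFill1_step]
    dsimp only
    by_cases hij : i = n+1 ∧ j = 0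
    · obtain ⟨rfl, rfl⟩ := hij
      rw [pvUpd2_self, if_pos (by omega)]
    · rw [pvUpd2_ne _ _ _ _ _ _ hij, ih]
      split_ifs <;> first | rfl | omega

theorem pvFill1_snd (N : Nat) : ∀ i j : Nat,
    (pvFill1 N).2 i j =
      if 1 ≤ i ∧ i ≤ N ∧ j = 0 then (some (i-1), some 0) else (none, none) := by
  induction N with
  | zero =>
    intro i j
    unfold pvFill1
    simp only [List.range'_zero, List.foldl_nil]
    split_ifs with h
    · omega
    · rfl
  | succ n ih =>
    intro i j
    rw [pvFill1_step]
    dsimp only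
    by_cases hij : i = n+1 ∧ j = 0
    · obtain ⟨rfl, rfl⟩ := hij
      rw [pvUpd2_self, if_pos (by omega)]
    · rw [pvUpd2_ne _ _ _ _ _ _ hij, ih]
      split_ifs <;> first | rfl | omega

theorem pvFill2_step (N m : Nat) : pvFill2 N (m+1) =
    (pvUpd2 (pvFill2 N m).1 0 (m+1) (((m+1 : Nat)) : Int),
     pvUpd2 (pvFill2 N m).2 0 (m+1) (some 0, some (m+1-1))) := by
  unfold pvFill2
  rw [pvRange'_succ, List.foldl_append]
  rfl

theorem pvFill2_fst (N M : Nat) : ∀ i j : Nat,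
    (pvFill2 N M).1 i j =
      if i = 0 ∧ 1 ≤ j ∧ j ≤ M then (j : Int) else (pvFill1 N).1 i j := by
  induction M with
  | zero =>
    intro i j
    unfold pvFill2
    simp only [List.range'_zero, List.foldl_nil]
    split_ifs with h
    · omega
    · rfl
  | succ m ih =>
    intro i j
    rw [pvFill2_step]
    dsimp only
    by_cases hij : i = 0 ∧ j = m+1
    · obtain ⟨rfl, rfl⟩ := hij
      rw [pvUpd2_self, if_pos (by omega)]
    · rw [pvUpd2_ne _ _ _ _ _ _ hij, ih]
      split_ifs <;> first | rfl | omega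

theorem pvFill2_snd (N M : Nat) : ∀ i j : Nat,
    (pvFill2 N M).2 i j =
      if i = 0 ∧ 1 ≤ j ∧ j ≤ M then (some 0, some (j-1)) else (pvFill1 N).2 i j := by
  induction M with
  | zero =>
    intro i j
    unfold pvFill2
    simp only [List.range'_zero, List.foldl_nil]
    split_ifs with h
    · omega
    · rfl
  | succ m ih =>
    intro i j
    rw [pvFill2_step]
    dsimp only
    by_cases hij : i = 0 ∧ j = m+1
    · obtain ⟨rfl, rfl⟩ := hij
      rw [pvUpd2_self, if_pos (by omega)]
    · rw [pvUpd2_ne _ _ _ _ _ _ hij, ih]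
      split_ifs <;> first | rfl | omega

theorem pvFill2_dp (s t : List Char) (N M i j : Nat) (hi : i ≤ N) (hj : j ≤ M)
    (h : i = 0 ∨ j = 0) : (pvFill2 N M).1 i j = pvD s t i j := by
  rw [pvFill2_fst, pvFill1_fst]
  rcases h with rfl | rfl
  · rw [pvD_row0]
    split_ifs <;> first | rfl | omega
  · rw [pvD_col0]
    split_ifs <;> first | rfl | omega

theorem pvFill2_path (s t : List Char) (N M i j : Nat) (hi : i ≤ N) (hj : j ≤ M)
    (h : i = 0 ∨ j = 0) : (pvFill2 N M).2 i j = pvP s t i j := by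
  rw [pvFill2_snd, pvFill1_snd]
  rcases h with rfl | rfl
  · cases j with
    | zero => rw [pvP]; split_ifs <;> first | rfl | omega
    | succ j' => rw [pvP]; split_ifs <;> first | rfl | omega
  · cases i with
    | zero => rw [pvP]; split_ifs <;> first | rfl | omega
    | succ i' => rw [pvP]; split_ifs <;> first | rfl | omega

theorem pvRowA_step (s t : List Char)
    (st : ((Nat → Nat → Int) × (Nat → Nat → Option Nat × Option Nat))) (i m : Nat) :
    pvRowA s t st i (m+1) =
      (if s.getD (i-1) ' ' = t.getD (m+1-1) ' ' then
        (pvUpd2 (pvRowA s t st i m).1 i (m+1) ((pvRowA s t st i m).1 (i-1) (m+1-1)),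
         pvUpd2 (pvRowA s t st i m).2 i (m+1) (some (i-1), some (m+1-1)))
      else if (pvRowA s t st i m).1 (i-1) (m+1) ≥ (pvRowA s t st i m).1 i (m+1-1) then
        (pvUpd2 (pvRowA s t st i m).1 i (m+1) (1 + (pvRowA s t st i m).1 i (m+1-1)),
         pvUpd2 (pvRowA s t st i m).2 i (m+1) (some i, some (m+1-1)))
      else
        (pvUpd2 (pvRowA s t st i m).1 i (m+1) (1 + (pvRowA s t st i m).1 (i-1) (m+1)),
         pvUpd2 (pvRowA s t st i m).2 i (m+1) (some (i-1), some (m+1)))) := by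
  unfold pvRowA
  rw [pvRange'_succ, List.foldl_append]
  rfl

theorem pvRowA_spec (s t : List Char)
    (st : ((Nat → Nat → Int) × (Nat → Nat → Option Nat × Option Nat)))
    (i : Nat) (hi : 1 ≤ i) : ∀ m : Nat,
    (∀ j, j ≤ m → st.1 (i-1) j = pvD s t (i-1) j) →
    (st.1 i 0 = pvD s t i 0) →
    (∀ i' j', ¬(i' = i ∧ 1 ≤ j' ∧ j' ≤ m) →
      (pvRowA s t st i m).1 i' j' = st.1 i' j' ∧ (pvRowA s t st i m).2 i' j' = st.2 i' j') ∧
    (∀ j, 1 ≤ j → j ≤ m →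
      (pvRowA s t st i m).1 i j = pvD s t i j ∧ (pvRowA s t st i m).2 i j = pvP s t i j) := by
  intro m
  induction m with
  | zero =>
    intro _ _
    constructor
    · intro i' j' _
      exact ⟨rfl, rfl⟩
    · intro j h1 h2; omega
  | succ m ih =>
    intro hprev hcol
    obtain ⟨frame, corr⟩ := ih (fun j hj => hprev j (by omega)) hcol
    have key : ∀ j, j ≤ m → (pvRowA s t st i m).1 i j = pvD s t i j := by
      intro j hj
      cases Nat.eq_zero_or_pos j with
      | inl h => subst h; rw [(frame i 0 (by omega)).1]; exact hcol
      | inr h => exact (corr j h hj).1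
    have keyPrev : ∀ j, j ≤ m + 1 → (pvRowA s t st i m).1 (i-1) j = pvD s t (i-1) j := by
      intro j hj
      rw [(frame (i-1) j (by omega)).1]
      exact hprev j hj
    constructor
    · intro i' j' hnot
      rw [pvRowA_step]
      have hne : ¬(i' = i ∧ j' = m+1) := by omega
      split_ifs <;> dsimp only <;>
        exact ⟨(pvUpd2_ne _ _ _ _ _ _ hne).trans (frame i' j' (by omega)).1,
               (pvUpd2_ne _ _ _ _ _ _ hne).trans (frame i' j' (by omega)).2⟩
    · intro j h1 h2
      rcases Nat.lt_or_ge j (m+1) with hj | hj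
      · rw [pvRowA_step]
        have hne : ¬(i = i ∧ j = m+1) := by omega
        have hcorr := corr j h1 (by omega)
        split_ifs <;> dsimp only <;>
          exact ⟨(pvUpd2_ne _ _ _ _ _ _ hne).trans hcorr.1,
                 (pvUpd2_ne _ _ _ _ _ _ hne).trans hcorr.2⟩
      · have hj' : j = m + 1 := by omega
        subst hj'
        obtain ⟨i₀, rfl⟩ : ∃ i₀, i = i₀ + 1 := ⟨i - 1, by omega⟩
        rw [pvRowA_step]
        simp only [Nat.add_sub_cancel]
        have rPrev1 : (pvRowA s t st (i₀+1) m).1 i₀ (m+1) = pvD s t i₀ (m+1) :=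
          keyPrev (m+1) (by omega)
        have rPrev0 : (pvRowA s t st (i₀+1) m).1 i₀ m = pvD s t i₀ m :=
          keyPrev m (by omega)
        have rCur : (pvRowA s t st (i₀+1) m).1 (i₀+1) m = pvD s t (i₀+1) m :=
          key m (by omega)
        split_ifs with hc hge
        · refine ⟨?_, ?_⟩ <;> dsimp only
          · rw [pvUpd2_self, rPrev0, pvD, if_pos hc]
          · rw [pvUpd2_self, pvP, if_pos hc]
        · rw [rPrev1, rCur] at hge
          refine ⟨?_, ?_⟩ <;> dsimp only
          · rw [pvUpd2_self, rCur, pvD, if_neg hc, if_pos hge]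
          · rw [pvUpd2_self, pvP, if_neg hc, if_pos hge]
        · rw [rPrev1, rCur] at hge
          refine ⟨?_, ?_⟩ <;> dsimp only
          · rw [pvUpd2_self, rPrev1, pvD, if_neg hc, if_neg hge]
          · rw [pvUpd2_self, pvP, if_neg hc, if_neg hge]

theorem pvFill3_step (s t : List Char) (N M k : Nat) :
    pvFill3 s t N M (k+1) = pvRowA s t (pvFill3 s t N M k) (k+1) M := by
  unfold pvFill3
  rw [pvRange'_succ, List.foldl_append]
  rfl

theorem pvFill3_spec (s t : List Char) (N M : Nat) : ∀ k, k ≤ N →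
    (∀ i, i ≤ k → ∀ j, j ≤ M →
      (pvFill3 s t N M k).1 i j = pvD s t i j ∧ (pvFill3 s t N M k).2 i j = pvP s t i j) ∧
    (∀ i, k < i → ∀ j,
      (pvFill3 s t N M k).1 i j = (pvFill2 N M).1 i j ∧
      (pvFill3 s t N M k).2 i j = (pvFill2 N M).2 i j) := by
  intro k
  induction k with
  | zero =>
    intro _
    constructor
    · intro i hi j hj
      have hi0 : i = 0 := by omega
      subst hi0
      exact ⟨pvFill2_dp s t N M 0 j (by omega) hj (Or.inl rfl),
             pvFill2_path s t N M 0 j (by omega) hj (Or.inl rfl)⟩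
    · intro i _ j
      exact ⟨rfl, rfl⟩
  | succ k ih =>
    intro hk
    obtain ⟨corr, frame⟩ := ih (by omega)
    have row := pvRowA_spec s t (pvFill3 s t N M k) (k+1) (by omega) M
      (fun j hj => (corr k (by omega) j hj).1)
      (by
        rw [(frame (k+1) (by omega) 0).1]
        exact pvFill2_dp s t N M (k+1) 0 (by omega) (by omega) (Or.inr rfl))
    obtain ⟨rframe, rcorr⟩ := row
    constructor
    · intro i hi j hj
      rcases Nat.lt_or_ge i (k+1) with hik | hik
      · rw [pvFill3_step]
        have := rframe i j (by omega)
        rw [this.1, this.2]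
        exact corr i (by omega) j hj
      · have hik' : i = k + 1 := by omega
        subst hik'
        cases Nat.eq_zero_or_pos j with
        | inl hj0 =>
          subst hj0
          rw [pvFill3_step]
          have h1 := rframe (k+1) 0 (by omega)
          rw [h1.1, h1.2, (frame (k+1) (by omega) 0).1, (frame (k+1) (by omega) 0).2]
          exact ⟨pvFill2_dp s t N M (k+1) 0 (by omega) (by omega) (Or.inr rfl),
                 pvFill2_path s t N M (k+1) 0 (by omega) (by omega) (Or.inr rfl)⟩
        | inr hj1 =>
          rw [pvFill3_step]
          exact rcorr j hj1 hj
    · intro i hik j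
      rw [pvFill3_step]
      have := rframe i j (by omega)
      rw [this.1, this.2]
      exact frame i (by omega) j

-- case analysis of the stored pointer, phrased on pvTrace/pvSyms branch conditions
theorem pvP_c1 (s t : List Char) (i j : Nat)
    (h : 0 < i ∧ 0 < j ∧ s.getD (i-1) ' ' = t.getD (j-1) ' ') :
    pvP s t i j = (some (i-1), some (j-1)) := by
  obtain ⟨hi, hj, hc⟩ := h
  obtain ⟨i₀, rfl⟩ : ∃ i₀, i = i₀ + 1 := ⟨i - 1, by omega⟩
  obtain ⟨j₀, rfl⟩ : ∃ j₀, j = j₀ + 1 := ⟨j - 1, by omega⟩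
  simp only [Nat.add_sub_cancel] at hc ⊢
  rw [pvP, if_pos hc]

theorem pvP_c2 (s t : List Char) (i j : Nat)
    (h0 : ¬(i = 0 ∧ j = 0))
    (h1 : ¬(0 < i ∧ 0 < j ∧ s.getD (i-1) ' ' = t.getD (j-1) ' '))
    (h2 : 0 < j ∧ (i = 0 ∨ pvD s t (i-1) j ≥ pvD s t i (j-1))) :
    pvP s t i j = (some i, some (j-1)) := by
  obtain ⟨hj, hor⟩ := h2
  obtain ⟨j₀, rfl⟩ : ∃ j₀, j = j₀ + 1 := ⟨j - 1, by omega⟩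
  cases Nat.eq_zero_or_pos i with
  | inl hi0 => subst hi0; rw [pvP]; simp
  | inr hi1 =>
    obtain ⟨i₀, rfl⟩ : ∃ i₀, i = i₀ + 1 := ⟨i - 1, by omega⟩
    have hc : ¬(s.getD i₀ ' ' = t.getD j₀ ' ') := by
      intro hc
      exact h1 ⟨hi1, hj, by simpa using hc⟩
    have hge : pvD s t i₀ (j₀+1) ≥ pvD s t (i₀+1) j₀ := by
      rcases hor with h | h
      · omega
      · simpa using h
    rw [pvP, if_neg hc, if_pos hge]
    simp

theorem pvP_c3 (s t : List Char) (i j : Nat)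
    (h0 : ¬(i = 0 ∧ j = 0))
    (h1 : ¬(0 < i ∧ 0 < j ∧ s.getD (i-1) ' ' = t.getD (j-1) ' '))
    (h2 : ¬(0 < j ∧ (i = 0 ∨ pvD s t (i-1) j ≥ pvD s t i (j-1)))) :
    pvP s t i j = (some (i-1), some j) := by
  have hi1 : 0 < i := by
    rcases Nat.eq_zero_or_pos i with hi | hi
    · exact absurd ⟨Nat.pos_of_ne_zero (fun hj => h0 ⟨hi, hj⟩), Or.inl hi⟩ h2
    · exact hi
  obtain ⟨i₀, rfl⟩ : ∃ i₀, i = i₀ + 1 := ⟨i - 1, by omega⟩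
  cases Nat.eq_zero_or_pos j with
  | inl hj0 => subst hj0; rw [pvP]; simp
  | inr hj1 =>
    obtain ⟨j₀, rfl⟩ : ∃ j₀, j = j₀ + 1 := ⟨j - 1, by omega⟩
    have hc : ¬(s.getD i₀ ' ' = t.getD j₀ ' ') := by
      intro hc
      exact h1 ⟨hi1, hj1, by simpa using hc⟩
    have hge : ¬(pvD s t i₀ (j₀+1) ≥ pvD s t (i₀+1) j₀) := by
      intro hge
      exact h2 ⟨hj1, Or.inr (by simpa using hge)⟩
    rw [pvP, if_neg hc, if_neg hge]
    simp

-- the while loop follows pvP and produces the abstract trace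
theorem pvWalkA_trace (s t : List Char) (N M : Nat)
    (path : Nat → Nat → Option Nat × Option Nat)
    (hpath : ∀ i, i ≤ N → ∀ j, j ≤ M → path i j = pvP s t i j) :
    ∀ fuel i j acc, i ≤ N → j ≤ M → i + j + 1 ≤ fuel →
      pvWalkA path fuel (some i) (some j) acc = acc ++ pvTrace s t i j := by
  intro fuel
  induction fuel with
  | zero => intro i j acc _ _ h; omega
  | succ f ih =>
    intro i j acc hiN hjM hfuel
    rw [pvWalkA, pvTrace]
    by_cases h0 : i = 0 ∧ j = 0
    · obtain ⟨rfl, rfl⟩ := h0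
      rw [hpath 0 (by omega) 0 (by omega)]
      rw [dif_pos (⟨rfl, rfl⟩ : (0:Nat) = 0 ∧ (0:Nat) = 0)]
      simp only [pvP]
      cases f <;> simp [pvWalkA]
    · rw [dif_neg h0]
      by_cases h1 : 0 < i ∧ 0 < j ∧ s.getD (i-1) ' ' = t.getD (j-1) ' '
      · rw [dif_pos h1, hpath i hiN j hjM, pvP_c1 s t i j h1]
        rw [ih (i-1) (j-1) (acc ++ [(i, j)]) (by omega) (by omega) (by omega)]
        simp
      · rw [dif_neg h1]
        by_cases h2 : 0 < j ∧ (i = 0 ∨ pvD s t (i-1) j ≥ pvD s t i (j-1))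
        · rw [dif_pos h2, hpath i hiN j hjM, pvP_c2 s t i j h0 h1 h2]
          rw [ih i (j-1) (acc ++ [(i, j)]) (by omega) (by omega) (by omega)]
          simp
        · rw [dif_neg h2, hpath i hiN j hjM, pvP_c3 s t i j h0 h1 h2]
          have hi1 : 0 < i := by
            rcases Nat.eq_zero_or_pos i with hi | hi
            · exact absurd ⟨Nat.pos_of_ne_zero (fun hj => h0 ⟨hi, hj⟩), Or.inl hi⟩ h2
            · exact hi
          rw [ih (i-1) j (acc ++ [(i, j)]) (by omega) (by omega) (by omega)]
          simp

theorem pvTrace_cons (s t : List Char) (i j : Nat) :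
    ∃ r, pvTrace s t i j = (i, j) :: r := by
  rw [pvTrace]
  split_ifs with h0 h1 h2
  · obtain ⟨rfl, rfl⟩ := h0
    exact ⟨[], rfl⟩
  · exact ⟨_, rfl⟩
  · exact ⟨_, rfl⟩
  · exact ⟨_, rfl⟩

-- turning A's index fold over final_path into the pairwise map
theorem pvFoldPairs (s t : List Char) (fp : List (Nat × Nat)) :
    (List.range' 1 (fp.length - 1)).foldl
      (fun ans i => ans ++ [pvEmit s t (fp.getD (i-1) (0,0)) (fp.getD i (0,0))]) [] =
    ((fp.zip (fp.drop 1)).map (fun p => pvEmit s t p.1 p.2)) := by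
  have gen : ∀ k, k ≤ fp.length - 1 →
      (List.range' 1 k).foldl
        (fun ans i => ans ++ [pvEmit s t (fp.getD (i-1) (0,0)) (fp.getD i (0,0))]) [] =
      (((fp.zip (fp.drop 1)).take k).map (fun p => pvEmit s t p.1 p.2)) := by
    intro k
    induction k with
    | zero => intro _; simp
    | succ k ih =>
      intro hk
      have hlen : k + 2 ≤ fp.length := by omega
      rw [pvRange'_succ, List.foldl_append, ih (by omega)]
      simp only [List.foldl_cons, List.foldl_nil, Nat.add_sub_cancel]
      have hzlen : (fp.zip (fp.drop 1)).length = fp.length - 1 := by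
        rw [List.length_zip, List.length_drop]; omega
      have hk1 : k < (fp.zip (fp.drop 1)).length := by omega
      rw [List.take_succ, List.getElem?_eq_getElem hk1]
      simp only [Option.toList_some, List.map_append, List.map_cons, List.map_nil]
      congr 1
      have hz : (fp.zip (fp.drop 1))[k]'hk1 = (fp[k]'(by omega), fp[k+1]'(by omega)) := by
        simp only [List.getElem_zip, List.getElem_drop, show 1+k = k+1 from by omega]
      have g1 : fp.getD k (0,0) = fp[k]'(by omega) := by
        rw [List.getD_eq_getElem?_getD, List.getElem?_eq_getElem (by omega : k < fp.length)]
        rfl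
      have g2 : fp.getD (k+1) (0,0) = fp[k+1]'(by omega) := by
        rw [List.getD_eq_getElem?_getD, List.getElem?_eq_getElem (by omega : k+1 < fp.length)]
        rfl
      rw [hz, g1, g2]
  cases fp with
  | nil => simp
  | cons a l =>
    rw [gen ((a :: l).length - 1) (le_refl _)]
    have hfull : (((a :: l).zip ((a :: l).drop 1)).take ((a :: l).length - 1)) =
        ((a :: l).zip ((a :: l).drop 1)) :=
      List.take_of_length_le (by rw [List.length_zip, List.length_drop]; omega)
    rw [hfull]

-- each consecutive pair of the trace emits exactly the matching symbol
theorem pvMapEmit (s t : List Char) : ∀ n i j, i + j ≤ n →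
    ((pvTrace s t i j).zip ((pvTrace s t i j).drop 1)).map (fun p => pvEmit s t p.1 p.2) =
      pvSyms s t i j := by
  intro n
  induction n with
  | zero =>
    intro i j h
    have hi : i = 0 := by omega
    have hj : j = 0 := by omega
    subst hi; subst hj
    rw [pvTrace, pvSyms]
    simp
  | succ n ih =>
    intro i j hn
    by_cases h0 : i = 0 ∧ j = 0
    · obtain ⟨rfl, rfl⟩ := h0
      rw [pvTrace, pvSyms]
      simp
    · rw [pvTrace, pvSyms, dif_neg h0, dif_neg h0]
      by_cases h1 : 0 < i ∧ 0 < j ∧ s.getD (i-1) ' ' = t.getD (j-1) ' '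
      · rw [dif_pos h1, dif_pos h1]
        obtain ⟨r, hr⟩ := pvTrace_cons s t (i-1) (j-1)
        rw [hr]
        simp only [List.drop_succ_cons, List.drop_zero, List.zip_cons_cons, List.map_cons]
        have hz : (((i-1, j-1) :: r).zip r) =
            ((pvTrace s t (i-1) (j-1)).zip ((pvTrace s t (i-1) (j-1)).drop 1)) := by
          rw [hr, List.drop_succ_cons, List.drop_zero]
        rw [hz, ih (i-1) (j-1) (by omega)]
        congr 1
        obtain ⟨hi, hj, -⟩ := h1
        have c1 : ((i-1 : Nat) : Int) = (i : Int) - 1 := by omega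
        have c2 : ((j-1 : Nat) : Int) = (j : Int) - 1 := by omega
        simp [pvEmit, c1, c2]
      · rw [dif_neg h1, dif_neg h1]
        by_cases h2 : 0 < j ∧ (i = 0 ∨ pvD s t (i-1) j ≥ pvD s t i (j-1))
        · rw [dif_pos h2, dif_pos h2]
          obtain ⟨r, hr⟩ := pvTrace_cons s t i (j-1)
          rw [hr]
          simp only [List.drop_succ_cons, List.drop_zero, List.zip_cons_cons, List.map_cons]
          have hz : (((i, j-1) :: r).zip r) =
              ((pvTrace s t i (j-1)).zip ((pvTrace s t i (j-1)).drop 1)) := by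
            rw [hr, List.drop_succ_cons, List.drop_zero]
          rw [hz, ih i (j-1) (by omega)]
          congr 1
          obtain ⟨hj, -⟩ := h2
          have c2 : ((j-1 : Nat) : Int) = (j : Int) - 1 := by omega
          have cne : ¬(((i : Nat) : Int) = (i : Int) - 1) := by omega
          simp [pvEmit, c2, cne]
        · rw [dif_neg h2, dif_neg h2]
          have hi1 : 0 < i := by
            rcases Nat.eq_zero_or_pos i with hi | hi
            · exact absurd ⟨Nat.pos_of_ne_zero (fun hj => h0 ⟨hi, hj⟩), Or.inl hi⟩ h2
            · exact hi
          obtain ⟨r, hr⟩ := pvTrace_cons s t (i-1) j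
          rw [hr]
          simp only [List.drop_succ_cons, List.drop_zero, List.zip_cons_cons, List.map_cons]
          have hz : (((i-1, j) :: r).zip r) =
              ((pvTrace s t (i-1) j).zip ((pvTrace s t (i-1) j).drop 1)) := by
            rw [hr, List.drop_succ_cons, List.drop_zero]
          rw [hz, ih (i-1) j (by omega)]
          congr 1
          have c1 : ((i-1 : Nat) : Int) = (i : Int) - 1 := by omega
          have cne : ¬(((j : Nat) : Int) = (j : Int) - 1) := by omega
          simp [pvEmit, c1, cne]

-- ========== B-side abstract development ==========

-- the LCS-length recurrence B's table computes
def pvLM (s t : List Char) : Nat → Nat → Nat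
  | 0, _ => 0
  | _+1, 0 => 0
  | i+1, j+1 =>
    if s.getD i ' ' = t.getD j ' ' then pvLM s t i j + 1
    else max (pvLM s t i (j+1)) (pvLM s t (i+1) j)
termination_by i j => (i, j)
decreasing_by all_goals (first | exact Prod.Lex.left _ _ (by omega) | exact Prod.Lex.right _ (by omega))

theorem pvLM_row0 (s t : List Char) (j : Nat) : pvLM s t 0 j = 0 := by rw [pvLM]

theorem pvLM_col0 (s t : List Char) (i : Nat) : pvLM s t i 0 = 0 := by
  cases i <;> rw [pvLM]

-- the edit distance is i + j − 2·LCS — the bridge between A's and B's tables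
theorem pvDL (s t : List Char) : ∀ n i j, i + j ≤ n →
    pvD s t i j = (i : Int) + j - 2 * (pvLM s t i j : Int) := by
  intro n
  induction n with
  | zero =>
    intro i j h
    have hi : i = 0 := by omega
    have hj : j = 0 := by omega
    subst hi; subst hj
    rw [pvD_row0, pvLM_row0]
    simp
  | succ n ih =>
    intro i j hn
    match i, j with
    | 0, j => rw [pvD_row0, pvLM_row0]; simp
    | i+1, 0 => rw [pvD_col0, pvLM_col0]; simp
    | i+1, j+1 =>
      rw [pvD, pvLM]
      have h1 := ih i j (by omega)
      have h2 := ih i (j+1) (by omega)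
      have h3 := ih (i+1) j (by omega)
      rcases Nat.le_total (pvLM s t i (j+1)) (pvLM s t (i+1) j) with hm | hm
      · rw [Nat.max_eq_right hm]
        split_ifs <;> omega
      · rw [Nat.max_eq_left hm]
        split_ifs <;> omega

theorem pvDle (s t : List Char) : ∀ n i j, i + j ≤ n → pvD s t i j ≤ (i : Int) + j := by
  intro n
  induction n with
  | zero =>
    intro i j h
    have hi : i = 0 := by omega
    have hj : j = 0 := by omega
    subst hi; subst hj
    rw [pvD_row0]; simp
  | succ n ih =>
    intro i j hn
    match i, j with
    | 0, j => rw [pvD_row0]; simp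
    | i+1, 0 => rw [pvD_col0]; simp
    | i+1, j+1 =>
      rw [pvD]
      have h1 := ih i j (by omega)
      have h2 := ih i (j+1) (by omega)
      have h3 := ih (i+1) j (by omega)
      split_ifs <;> push_cast <;> push_cast at h1 h2 h3 <;> omega

theorem pvDge (s t : List Char) : ∀ (n i j : Nat), i + j ≤ n →
    (i : Int) - (j : Int) ≤ pvD s t i j ∧ (j : Int) - (i : Int) ≤ pvD s t i j := by
  intro n
  induction n with
  | zero =>
    intro i j h
    have hi : i = 0 := by omega
    have hj : j = 0 := by omega
    subst hi; subst hj
    rw [pvD_row0]; simp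
  | succ n ih =>
    intro i j hn
    match i, j with
    | 0, j => rw [pvD_row0]; constructor <;> omega
    | i+1, 0 => rw [pvD_col0]; constructor <;> omega
    | i+1, j+1 =>
      rw [pvD]
      have h1 := ih i j (by omega)
      have h2 := ih i (j+1) (by omega)
      have h3 := ih (i+1) j (by omega)
      split_ifs <;> push_cast <;> push_cast at h1 h2 h3 <;> omega

theorem pvD_succ (s t : List Char) (a b : Nat) :
    pvD s t (a+1) (b+1) =
      if s.getD a ' ' = t.getD b ' ' then pvD s t a b
      else if pvD s t a (b+1) ≥ pvD s t (a+1) b then 1 + pvD s t (a+1) b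
      else 1 + pvD s t a (b+1) := by
  rw [pvD]

-- neighbouring dp values differ by at most one
theorem pvDbnd (s t : List Char) : ∀ n i j, i + j ≤ n →
    pvD s t (i+1) j ≤ pvD s t i j + 1 ∧ pvD s t i j ≤ pvD s t (i+1) j + 1 ∧
    pvD s t i (j+1) ≤ pvD s t i j + 1 ∧ pvD s t i j ≤ pvD s t i (j+1) + 1 := by
  intro n
  induction n with
  | zero =>
    intro i j h
    have hi : i = 0 := by omega
    have hj : j = 0 := by omega
    subst hi; subst hj
    rw [pvD_row0, pvD_col0, pvD_row0]
    simp
  | succ n ih =>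
    intro i j hn
    match i, j with
    | 0, j =>
      have hle := pvDle s t ((0+1) + j) (0+1) j le_rfl
      have hge := (pvDge s t ((0+1) + j) (0+1) j le_rfl).2
      simp only [pvD_row0]
      refine ⟨?_, ?_, ?_, ?_⟩ <;> omega
    | i+1, 0 =>
      have hle := pvDle s t ((i+1) + (0+1)) (i+1) (0+1) le_rfl
      have hge := (pvDge s t ((i+1) + (0+1)) (i+1) (0+1) le_rfl).1
      simp only [pvD_col0]
      refine ⟨?_, ?_, ?_, ?_⟩ <;> omega
    | i+1, j+1 =>
      have ihA := ih i j (by omega)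
      have ihB := ih (i+1) j (by omega)
      have ihC := ih i (j+1) (by omega)
      obtain ⟨a1, a2, a3, a4⟩ := ihA
      obtain ⟨b1, b2, b3, b4⟩ := ihB
      obtain ⟨c1, c2, c3, c4⟩ := ihC
      have hY := pvD_succ s t i j
      have hX := pvD_succ s t (i+1) j
      have hZ := pvD_succ s t i (j+1)
      split_ifs at hX hY hZ <;>
        exact ⟨by omega, by omega, by omega, by omega⟩

-- the matched index pairs along A's backtrack, in backward (decreasing) order
def pvPairsAbs (s t : List Char) (i j : Nat) : List (Nat × Nat) :=
  if h0 : i = 0 ∧ j = 0 then []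
  else if h1 : 0 < i ∧ 0 < j ∧ s.getD (i-1) ' ' = t.getD (j-1) ' ' then
    (i-1, j-1) :: pvPairsAbs s t (i-1) (j-1)
  else if h2 : 0 < j ∧ (i = 0 ∨ pvD s t (i-1) j ≥ pvD s t i (j-1)) then
    pvPairsAbs s t i (j-1)
  else pvPairsAbs s t (i-1) j
termination_by i + j
decreasing_by
  · obtain ⟨a, b, -⟩ := h1; omega
  · obtain ⟨a, -⟩ := h2; omega
  · rcases Nat.eq_zero_or_pos i with hi | hi
    · exact absurd ⟨Nat.pos_of_ne_zero (fun hj => h0 ⟨hi, hj⟩), Or.inl hi⟩ h2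
    · omega

-- the backward merge: each gap emits '+'-lines (backward) then '-'-lines (backward)
def pvBMerge (s t : List Char) : Nat → Nat → List (Nat × Nat) → List String
  | i, j, [] => (pvInsF t 0 j).reverse ++ (pvDelsF s 0 i).reverse
  | i, j, p :: r =>
      (pvInsF t (p.2+1) j).reverse ++ (pvDelsF s (p.1+1) i).reverse ++
        String.ofList [s.getD p.1 ' '] :: pvBMerge s t p.1 p.2 r

theorem pvBMerge_nil (s t : List Char) (i j : Nat) :
    pvBMerge s t i j [] = (pvInsF t 0 j).reverse ++ (pvDelsF s 0 i).reverse := rfl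

theorem pvBMerge_cons (s t : List Char) (i j : Nat) (p : Nat × Nat) (r : List (Nat × Nat)) :
    pvBMerge s t i j (p :: r) =
      (pvInsF t (p.2+1) j).reverse ++ (pvDelsF s (p.1+1) i).reverse ++
        String.ofList [s.getD p.1 ' '] :: pvBMerge s t p.1 p.2 r := rfl

theorem pvInsF_nil (t : List Char) (a b : Nat) (h : b ≤ a) : pvInsF t a b = [] := by
  unfold pvInsF
  rw [show b - a = 0 by omega]
  simp

theorem pvDelsF_nil (s : List Char) (a b : Nat) (h : b ≤ a) : pvDelsF s a b = [] := by
  unfold pvDelsF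
  rw [show b - a = 0 by omega]
  simp

theorem pvInsF_snoc (t : List Char) (a b : Nat) (hab : a < b) (hb : b ≤ t.length) :
    pvInsF t a b = pvInsF t a (b-1) ++ [String.ofList ['+', t.getD (b-1) ' ']] := by
  unfold pvInsF
  rw [show b - a = (b - 1 - a) + 1 by omega, List.take_add_one, List.map_append]
  congr 1
  rw [List.getElem?_drop, show a + (b - 1 - a) = b - 1 by omega,
      List.getElem?_eq_getElem (by omega : b - 1 < t.length)]
  simp only [Option.toList_some, List.map_cons, List.map_nil]
  have hg : t.getD (b-1) ' ' = t[b-1]'(by omega) := by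
    rw [List.getD_eq_getElem?_getD, List.getElem?_eq_getElem (by omega : b - 1 < t.length)]
    rfl
  rw [hg]

theorem pvDelsF_snoc (s : List Char) (a b : Nat) (hab : a < b) (hb : b ≤ s.length) :
    pvDelsF s a b = pvDelsF s a (b-1) ++ [String.ofList ['-', s.getD (b-1) ' ']] := by
  unfold pvDelsF
  rw [show b - a = (b - 1 - a) + 1 by omega, List.take_add_one, List.map_append]
  congr 1
  rw [List.getElem?_drop, show a + (b - 1 - a) = b - 1 by omega,
      List.getElem?_eq_getElem (by omega : b - 1 < s.length)]
  simp only [Option.toList_some, List.map_cons, List.map_nil]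
  have hg : s.getD (b-1) ' ' = s[b-1]'(by omega) := by
    rw [List.getD_eq_getElem?_getD, List.getElem?_eq_getElem (by omega : b - 1 < s.length)]
    rfl
  rw [hg]

theorem pvInsF_rev_cons (t : List Char) (a b : Nat) (hab : a < b) (hb : b ≤ t.length) :
    (pvInsF t a b).reverse =
      String.ofList ['+', t.getD (b-1) ' '] :: (pvInsF t a (b-1)).reverse := by
  rw [pvInsF_snoc t a b hab hb, List.reverse_append]
  rfl

theorem pvDelsF_rev_cons (s : List Char) (a b : Nat) (hab : a < b) (hb : b ≤ s.length) :
    (pvDelsF s a b).reverse =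
      String.ofList ['-', s.getD (b-1) ' '] :: (pvDelsF s a (b-1)).reverse := by
  rw [pvDelsF_snoc s a b hab hb, List.reverse_append]
  rfl

-- every recorded pair lies strictly below the walk's current cell
theorem pvPairsAbs_bound (s t : List Char) : ∀ n i j, i + j ≤ n →
    ∀ p ∈ pvPairsAbs s t i j, p.1 + 1 ≤ i ∧ p.2 + 1 ≤ j := by
  intro n
  induction n with
  | zero =>
    intro i j h p hp
    have hi : i = 0 := by omega
    have hj : j = 0 := by omega
    subst hi; subst hj
    rw [pvPairsAbs] at hp
    simp at hp
  | succ n ih =>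
    intro i j hn p hp
    rw [pvPairsAbs] at hp
    split_ifs at hp with h0 h1 h2
    · simp at hp
    · rcases List.mem_cons.mp hp with rfl | hp'
      · exact ⟨by omega, by omega⟩
      · have := ih (i-1) (j-1) (by omega) p hp'
        omega
    · have := ih i (j-1) (by omega) p hp
      omega
    · have hi1 : 0 < i := by
        rcases Nat.eq_zero_or_pos i with hi | hi
        · exact absurd ⟨Nat.pos_of_ne_zero (fun hj => h0 ⟨hi, hj⟩), Or.inl hi⟩ h2
        · exact hi
      have := ih (i-1) j (by omega) p hp
      omega

theorem pvPairsAbs_j0 (s t : List Char) : ∀ i, pvPairsAbs s t i 0 = [] := by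
  intro i
  induction i with
  | zero => rw [pvPairsAbs]; simp
  | succ i ih =>
    rw [pvPairsAbs]
    rw [dif_neg (by omega : ¬(i + 1 = 0 ∧ 0 = 0)),
        dif_neg (by simp : ¬(0 < i + 1 ∧ 0 < 0 ∧ s.getD (i+1-1) ' ' = t.getD (0-1) ' ')),
        dif_neg (by simp : ¬(0 < 0 ∧ (i + 1 = 0 ∨ pvD s t (i+1-1) 0 ≥ pvD s t (i+1) (0-1))))]
    simpa using ih

-- once the walk takes an up-move inside a gap, it goes up until the next match:
-- the pair list from the cell above starts with a pair matched at column j-1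
theorem pvChain (s t : List Char) : ∀ i j, 0 < i → 0 < j →
    ¬(s.getD (i-1) ' ' = t.getD (j-1) ' ') →
    pvD s t (i-1) j < pvD s t i (j-1) →
    ∃ mi r, pvPairsAbs s t (i-1) j = (mi, j-1) :: r := by
  intro i
  induction i using Nat.strong_induction_on with
  | _ i ih =>
    intro j hi hj hmm hlt
    -- i = 1 is impossible
    have hi2 : 2 ≤ i := by
      rcases Nat.lt_or_ge i 2 with h | h
      · exfalso
        have hi1 : i = 1 := by omega
        subst hi1
        have h01 : pvD s t 0 j = (j : Int) := pvD_row0 s t j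
        have hle : pvD s t 1 (j-1) ≤ (1 : Int) + ((j-1 : Nat) : Int) :=
          pvDle s t (1 + (j-1)) 1 (j-1) le_rfl
        simp only [show (1:Nat) - 1 = 0 from rfl] at hlt
        rw [h01] at hlt
        have : ((j - 1 : Nat) : Int) = (j : Int) - 1 := by omega
        omega
      · exact h
    rw [pvPairsAbs]
    rw [dif_neg (by omega : ¬(i - 1 = 0 ∧ j = 0))]
    by_cases h1 : 0 < i - 1 ∧ 0 < j ∧ s.getD (i-1-1) ' ' = t.getD (j-1) ' '
    · rw [dif_pos h1]
      exact ⟨i-1-1, _, rfl⟩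
    · rw [dif_neg h1]
      have hmm' : ¬(s.getD (i-1-1) ' ' = t.getD (j-1) ' ') := by
        intro hc
        exact h1 ⟨by omega, hj, hc⟩
      -- show the '+'-branch is impossible at (i-1, j)
      have hnot2 : ¬(0 < j ∧ (i - 1 = 0 ∨ pvD s t (i-1-1) j ≥ pvD s t (i-1) (j-1))) := by
        rintro ⟨-, h | hge⟩
        · omega
        · -- then pvD (i-1) j = 1 + pvD (i-1) (j-1), contradicting hlt via the step bound
          have hgen : ∀ a b : Nat, ¬(s.getD a ' ' = t.getD b ' ') →
              pvD s t a (b+1) ≥ pvD s t (a+1) b →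
              pvD s t (a+1) (b+1) = 1 + pvD s t (a+1) b := by
            intro a b hc hge'
            rw [pvD_succ, if_neg hc, if_pos hge']
          have e1 : i - 1 - 1 = i - 2 := by omega
          have e2 : (j - 1) + 1 = j := by omega
          have e3 : (i - 2) + 1 = i - 1 := by omega
          rw [e1] at hmm' hge
          have hval : pvD s t (i-1) j = 1 + pvD s t (i-1) (j-1) := by
            have h := hgen (i-2) (j-1) hmm' (by rw [e2, e3]; exact hge)
            rw [e2, e3] at h
            exact h
          have hstep : pvD s t i (j-1) ≤ pvD s t (i-1) (j-1) + 1 := by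
            have h := (pvDbnd s t ((i-1) + (j-1)) (i-1) (j-1) le_rfl).1
            rw [show i - 1 + 1 = i by omega] at h
            exact h
          omega
      rw [dif_neg hnot2]
      have hlt' : pvD s t (i-1-1) j < pvD s t (i-1) (j-1) := by
        by_contra hge
        exact hnot2 ⟨hj, Or.inr (by omega)⟩
      exact ih (i-1) (by omega) j (by omega) hj hmm' hlt'

-- A's symbol list is exactly the backward merge of the matched pairs
theorem pvSymsMerge (s t : List Char) : ∀ n i j, i + j ≤ n → i ≤ s.length → j ≤ t.length →
    pvSyms s t i j = pvBMerge s t i j (pvPairsAbs s t i j) := by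
  intro n
  induction n with
  | zero =>
    intro i j h _ _
    have hi : i = 0 := by omega
    have hj : j = 0 := by omega
    subst hi; subst hj
    rw [pvSyms, pvPairsAbs]
    simp [pvBMerge_nil, pvInsF, pvDelsF]
  | succ n ih =>
    intro i j hn his hjt
    by_cases h0 : i = 0 ∧ j = 0
    · obtain ⟨rfl, rfl⟩ := h0
      rw [pvSyms, pvPairsAbs]
      simp [pvBMerge_nil, pvInsF, pvDelsF]
    · rw [pvSyms, pvPairsAbs, dif_neg h0, dif_neg h0]
      by_cases h1 : 0 < i ∧ 0 < j ∧ s.getD (i-1) ' ' = t.getD (j-1) ' '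
      · rw [dif_pos h1, dif_pos h1]
        obtain ⟨hi, hj, -⟩ := h1
        rw [pvBMerge_cons]
        simp only
        rw [pvInsF_nil t (j-1+1) j (by omega), pvDelsF_nil s (i-1+1) i (by omega)]
        simp only [List.reverse_nil, List.nil_append]
        rw [ih (i-1) (j-1) (by omega) (by omega) (by omega)]
      · rw [dif_neg h1, dif_neg h1]
        by_cases h2 : 0 < j ∧ (i = 0 ∨ pvD s t (i-1) j ≥ pvD s t i (j-1))
        · rw [dif_pos h2, dif_pos h2]
          obtain ⟨hj, -⟩ := h2
          rw [ih i (j-1) (by omega) his (by omega)]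
          cases hps : pvPairsAbs s t i (j-1) with
          | nil =>
            rw [pvBMerge_nil, pvBMerge_nil, pvInsF_rev_cons t 0 j hj hjt]
            simp
          | cons p r =>
            have hb := pvPairsAbs_bound s t (i + (j-1)) i (j-1) le_rfl p
              (by rw [hps]; exact List.mem_cons_self)
            rw [pvBMerge_cons, pvBMerge_cons, pvInsF_rev_cons t (p.2+1) j (by omega) hjt]
            simp [List.append_assoc]
        · rw [dif_neg h2, dif_neg h2]
          have hi1 : 0 < i := by
            rcases Nat.eq_zero_or_pos i with hi | hi
            · exact absurd ⟨Nat.pos_of_ne_zero (fun hj => h0 ⟨hi, hj⟩), Or.inl hi⟩ h2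
            · exact hi
          rw [ih (i-1) j (by omega) (by omega) hjt]
          cases Nat.eq_zero_or_pos j with
          | inl hj0 =>
            subst hj0
            rw [pvPairsAbs_j0, pvBMerge_nil, pvBMerge_nil, pvDelsF_rev_cons s 0 i hi1 his]
            simp [pvInsF]
          | inr hj1 =>
            have hmm : ¬(s.getD (i-1) ' ' = t.getD (j-1) ' ') := by
              intro hc
              exact h1 ⟨hi1, hj1, hc⟩
            have hlt : pvD s t (i-1) j < pvD s t i (j-1) := by
              by_contra hge
              exact h2 ⟨hj1, Or.inr (by omega)⟩
            obtain ⟨mi, r, hpr⟩ := pvChain s t i j hi1 hj1 hmm hlt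
            have hb := pvPairsAbs_bound s t ((i-1) + j) (i-1) j le_rfl (mi, j-1)
              (by rw [hpr]; exact List.mem_cons_self)
            rw [hpr, pvBMerge_cons, pvBMerge_cons]
            simp only
            rw [pvInsF_nil t (j-1+1) j (by omega),
                pvDelsF_rev_cons s (mi+1) i (by omega) his]
            simp [List.append_assoc]

-- ========== B-port correctness ==========

theorem pvLRowB_step (s t : List Char) (L : List (List Nat)) (i m : Nat) :
    pvLRowB s t L i (m+1) =
      (if s.getD (i-1) ' ' = t.getD (m+1-1) ' ' then
        pvLRowB s t L i m ++ [(L.getD (i-1) []).getD (m+1-1) 0 + 1]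
      else
        pvLRowB s t L i m ++
          [max ((L.getD (i-1) []).getD (m+1) 0) ((pvLRowB s t L i m).getD (m+1-1) 0)]) := by
  unfold pvLRowB
  rw [pvRange'_succ, List.foldl_append]
  rfl

theorem pvLRowB_spec (s t : List Char) (M k : Nat) (L : List (List Nat))
    (hL : L = (List.range (k+1)).map (fun i => (List.range (M+1)).map (fun j => pvLM s t i j))) :
    ∀ m, m ≤ M → pvLRowB s t L (k+1) m = (List.range (m+1)).map (fun j => pvLM s t (k+1) j) := by
  have hLrow : L.getD k [] = (List.range (M+1)).map (fun j => pvLM s t k j) := by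
    rw [hL]
    exact pvGetDmr _ (k+1) k (by omega) []
  intro m
  induction m with
  | zero =>
    intro _
    unfold pvLRowB
    simp only [List.range'_zero, List.foldl_nil]
    simp [List.range_succ, pvLM_col0]
  | succ m ih =>
    intro hm
    rw [pvLRowB_step, ih (by omega)]
    simp only [Nat.add_sub_cancel]
    rw [hLrow]
    have r1 : ((List.range (M+1)).map (fun j => pvLM s t k j)).getD m 0 = pvLM s t k m :=
      pvGetDmr _ (M+1) m (by omega) 0
    have r2 : ((List.range (M+1)).map (fun j => pvLM s t k j)).getD (m+1) 0 = pvLM s t k (m+1) :=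
      pvGetDmr _ (M+1) (m+1) (by omega) 0
    have r3 : ((List.range (m+1)).map (fun j => pvLM s t (k+1) j)).getD m 0 = pvLM s t (k+1) m :=
      pvGetDmr _ (m+1) m (by omega) 0
    rw [r1, r2, r3]
    have hR : pvLM s t (k+1) (m+1) =
        if s.getD k ' ' = t.getD m ' ' then pvLM s t k m + 1
        else max (pvLM s t k (m+1)) (pvLM s t (k+1) m) := by rw [pvLM]
    split_ifs with hc
    · conv_rhs => rw [List.range_succ, List.map_append]
      congr 1
      simp only [List.map_cons, List.map_nil]
      rw [hR, if_pos hc]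
    · conv_rhs => rw [List.range_succ, List.map_append]
      congr 1
      simp only [List.map_cons, List.map_nil]
      rw [hR, if_neg hc]

theorem pvLTabB_step (s t : List Char) (M k : Nat) :
    pvLTabB s t M (k+1) = pvLTabB s t M k ++ [pvLRowB s t (pvLTabB s t M k) (k+1) M] := by
  unfold pvLTabB
  rw [pvRange'_succ, List.foldl_append]
  rfl

theorem pvLTabB_spec (s t : List Char) (M : Nat) : ∀ k,
    pvLTabB s t M k =
      (List.range (k+1)).map (fun i => (List.range (M+1)).map (fun j => pvLM s t i j)) := by
  intro k
  induction k with
  | zero =>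
    unfold pvLTabB
    rw [List.range'_zero, List.foldl_nil, List.range_one, List.map_cons, List.map_nil]
    congr 1
    symm
    rw [List.eq_replicate_iff]
    refine ⟨by simp, ?_⟩
    intro b hb
    simp only [List.mem_map, List.mem_range] at hb
    obtain ⟨j, -, rfl⟩ := hb
    exact pvLM_row0 s t j
  | succ k ih =>
    rw [pvLTabB_step, ih,
      pvLRowB_spec s t M k _ rfl M le_rfl,
      List.range_succ (n := k+1), List.map_append]
    rfl

-- B's walk records the abstract matched pairs
theorem pvPairsB_spec (s t : List Char) (N M : Nat) (L : List (List Nat))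
    (hL : ∀ i, i ≤ N → ∀ j, j ≤ M → (L.getD i []).getD j 0 = pvLM s t i j) :
    ∀ n i j acc, i + j ≤ n → i ≤ N → j ≤ M →
      pvPairsB s t L i j acc = acc ++ pvPairsAbs s t i j := by
  intro n
  induction n with
  | zero =>
    intro i j acc h hiN hjM
    have hi : i = 0 := by omega
    have hj : j = 0 := by omega
    subst hi; subst hj
    rw [pvPairsB, pvPairsAbs]
    rw [dif_pos (⟨rfl, rfl⟩ : (0:Nat) = 0 ∧ (0:Nat) = 0),
        dif_pos (⟨rfl, rfl⟩ : (0:Nat) = 0 ∧ (0:Nat) = 0)]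
    simp
  | succ n ih =>
    intro i j acc hn hiN hjM
    rw [pvPairsB, pvPairsAbs]
    by_cases h0 : i = 0 ∧ j = 0
    · rw [dif_pos h0, dif_pos h0]; simp
    · rw [dif_neg h0, dif_neg h0]
      by_cases h1 : 0 < i ∧ 0 < j ∧ s.getD (i-1) ' ' = t.getD (j-1) ' '
      · rw [dif_pos h1, dif_pos h1,
          ih (i-1) (j-1) _ (by omega) (by omega) (by omega)]
        simp
      · rw [dif_neg h1, dif_neg h1]
        have hcondEq : (0 < j ∧ (i = 0 ∨ (L.getD i []).getD (j-1) 0 ≥ (L.getD (i-1) []).getD j 0))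
            ↔ (0 < j ∧ (i = 0 ∨ pvD s t (i-1) j ≥ pvD s t i (j-1))) := by
          constructor
          · rintro ⟨hj, h | hge⟩
            · exact ⟨hj, Or.inl h⟩
            · refine ⟨hj, ?_⟩
              rcases Nat.eq_zero_or_pos i with hi0 | hi0
              · exact Or.inl hi0
              · right
                rw [hL i hiN (j-1) (by omega), hL (i-1) (by omega) j hjM] at hge
                have e1 := pvDL s t ((i-1) + j) (i-1) j le_rfl
                have e2 := pvDL s t (i + (j-1)) i (j-1) le_rfl
                have c : ((i - 1 : Nat) : Int) = (i : Int) - 1 := by omega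
                have c2 : ((j - 1 : Nat) : Int) = (j : Int) - 1 := by omega
                rw [e1, e2, c, c2]
                omega
          · rintro ⟨hj, h | hge⟩
            · exact ⟨hj, Or.inl h⟩
            · refine ⟨hj, ?_⟩
              rcases Nat.eq_zero_or_pos i with hi0 | hi0
              · exact Or.inl hi0
              · right
                rw [hL i hiN (j-1) (by omega), hL (i-1) (by omega) j hjM]
                have e1 := pvDL s t ((i-1) + j) (i-1) j le_rfl
                have e2 := pvDL s t (i + (j-1)) i (j-1) le_rfl
                have c : ((i - 1 : Nat) : Int) = (i : Int) - 1 := by omega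
                have c2 : ((j - 1 : Nat) : Int) = (j : Int) - 1 := by omega
                rw [e1, e2, c, c2] at hge
                omega
        by_cases h2 : 0 < j ∧ (i = 0 ∨ pvD s t (i-1) j ≥ pvD s t i (j-1))
        · rw [dif_pos (hcondEq.mpr h2), dif_pos h2,
            ih i (j-1) _ (by omega) (by omega) (by omega)]
        · rw [dif_neg (fun hc => h2 (hcondEq.mp hc)), dif_neg h2]
          have hi1 : 0 < i := by
            rcases Nat.eq_zero_or_pos i with hi | hi
            · exact absurd ⟨Nat.pos_of_ne_zero (fun hj => h0 ⟨hi, hj⟩), Or.inl hi⟩ h2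
            · exact hi
          rw [ih (i-1) j _ (by omega) (by omega) (by omega)]

-- the forward merge fold is the reverse of the backward merge
theorem pvMergeFwd (s t : List Char) : ∀ (ps : List (Nat × Nat)) (i j : Nat),
    (let st := ps.reverse.foldl (fun st p =>
        (st.1 ++ pvDelsF s st.2.1 p.1 ++ pvInsF t st.2.2 p.2 ++ [String.ofList [s.getD p.1 ' ']],
         p.1 + 1, p.2 + 1)) (([] : List String), 0, 0)
     st.1 ++ pvDelsF s st.2.1 i ++ pvInsF t st.2.2 j) =
    (pvBMerge s t i j ps).reverse := by
  intro ps
  induction ps with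
  | nil =>
    intro i j
    simp [pvBMerge, List.reverse_append]
  | cons p r ih =>
    intro i j
    simp only [List.reverse_cons, List.foldl_append, List.foldl_cons, List.foldl_nil]
    have ihp := ih p.1 p.2
    simp only at ihp
    rw [pvBMerge]
    simp only [List.reverse_append, List.reverse_cons]
    rw [← ihp]
    simp [List.append_assoc]

-- ===== VERDICT (by name: the statement is the Claim_ definition above) =====
theorem diffBetweenTwoStrings_spec : Claim_equal_diffBetweenTwoStrings := by
  intro source target _
  unfold Spec_diffBetweenTwoStrings
  show diffBetweenTwoStrings source target = diffBetweenTwoStrings_alt source target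
  simp only [diffBetweenTwoStrings, diffBetweenTwoStrings_alt]
  set s := source.toList with hs
  set t := target.toList with ht
  set N := s.length with hN
  set M := t.length with hM
  have hpath : ∀ i, i ≤ N → ∀ j, j ≤ M → (pvFill3 s t N M N).2 i j = pvP s t i j :=
    fun i hi j hj => ((pvFill3_spec s t N M N le_rfl).1 i hi j hj).2
  rw [pvWalkA_trace s t N M _ hpath (N+M+1) N M [] le_rfl le_rfl (by omega)]
  rw [List.nil_append]
  rw [pvFoldPairs s t (pvTrace s t N M)]
  rw [pvMapEmit s t (N+M) N M le_rfl]
  have hL : ∀ i, i ≤ N → ∀ j, j ≤ M →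
      (((pvLTabB s t M N).getD i []).getD j 0) = pvLM s t i j := by
    intro i hi j hj
    rw [pvLTabB_spec s t M N, pvGetDmr _ (N+1) i (by omega) [], pvGetDmr _ (M+1) j (by omega) 0]
  rw [pvPairsB_spec s t N M (pvLTabB s t M N) hL (N+M) N M [] le_rfl le_rfl le_rfl]
  rw [List.nil_append]
  rw [pvSymsMerge s t (N+M) N M le_rfl le_rfl le_rfl]
  exact (pvMergeFwd s t (pvPairsAbs s t N M) N M).symm
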